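-- pv_equiv track=rewrite | github.com/svenkovacic7/Python | razlika_vremena.py | sekunde_u_vrijeme
-- ===== SOURCE A (Python) =====
-- def sekunde_u_vrijeme(a):
--     b = ["0","0","0"]
--     a = int(a)
--     while a >= 60:
--         if a >= 3600:
--             b[0] = str(a//3600)
--             a -= (a//3600)*3600
--         else:
--             b[1] = str(a//60)
--             a -= (a//60)*60
--     b[2] = str(a)
--     return(":".join(b))
-- ===== SOURCE B (Python) =====
-- def sekunde_u_vrijeme(a):
--     a = int(a)
--     if a < 60:
--         return ":".join(["0", "0", str(a)])
--     h, rem = divmod(a, 3600)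
--     m, s = divmod(rem, 60)
--     return ":".join([str(h), str(m), str(s)])
-- ===== Notes on version B (the rewrite author's own statement) =====
-- stated objective: simpler
-- what changed: Replaces A's while loop with repeated subtraction by a direct divmod closed form (with the same sub-60 early return, which also covers negative inputs exactly as A does).
import Mathlib
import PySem

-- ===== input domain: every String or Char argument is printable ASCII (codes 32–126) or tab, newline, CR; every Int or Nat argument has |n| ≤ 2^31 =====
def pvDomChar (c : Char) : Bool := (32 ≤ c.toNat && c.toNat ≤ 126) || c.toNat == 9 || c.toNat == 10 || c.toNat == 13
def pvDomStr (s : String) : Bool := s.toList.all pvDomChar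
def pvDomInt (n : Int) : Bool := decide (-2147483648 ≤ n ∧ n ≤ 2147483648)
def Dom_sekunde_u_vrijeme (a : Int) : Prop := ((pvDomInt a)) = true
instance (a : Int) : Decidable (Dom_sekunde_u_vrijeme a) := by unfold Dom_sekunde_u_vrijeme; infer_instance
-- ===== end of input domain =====

-- B replaces A's while loop (repeated subtraction of hour/minute blocks) with a direct
-- divmod closed form; same return value for every int input (return value only).

-- ===== PORT A =====
-- the while loop of A: state is (a, b[0], b[1]); b[2] is written on exit
def sekundeLoop (a : Int) (b0 b1 : String) : String :=
  if 60 ≤ a then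
    if 3600 ≤ a then
      sekundeLoop (a - (PySem.Int.floordiv a 3600) * 3600) (PySem.Int.toStr (PySem.Int.floordiv a 3600)) b1
    else
      sekundeLoop (a - (PySem.Int.floordiv a 60) * 60) b0 (PySem.Int.toStr (PySem.Int.floordiv a 60))
  else
    PySem.Str.join ":" [b0, b1, PySem.Int.toStr a]
termination_by a.toNat
decreasing_by
  · have h1 := PySem.Int.floordiv_mul_add_mod a 3600
    have h2 := PySem.Int.mod_lt a (b := 3600) (by norm_num)
    have h3 := PySem.Int.mod_nonneg a (b := 3600) (by norm_num)
    omega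
  · have h1 := PySem.Int.floordiv_mul_add_mod a 60
    have h2 := PySem.Int.mod_lt a (b := 60) (by norm_num)
    have h3 := PySem.Int.mod_nonneg a (b := 60) (by norm_num)
    omega

def sekunde_u_vrijeme (a : Int) : String := sekundeLoop a "0" "0"

-- ===== PORT B =====
def sekunde_u_vrijeme_alt (a : Int) : String :=
  if a < 60 then PySem.Str.join ":" ["0", "0", PySem.Int.toStr a]
  else
    let h := PySem.Int.floordiv a 3600
    let rem := PySem.Int.mod a 3600
    let m := PySem.Int.floordiv rem 60
    let s := PySem.Int.mod rem 60
    PySem.Str.join ":" [PySem.Int.toStr h, PySem.Int.toStr m, PySem.Int.toStr s]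

-- ===== PRECONDITION & SPEC =====
def Spec_sekunde_u_vrijeme (a : Int) (out : String) : Prop := out = sekunde_u_vrijeme_alt a
instance (a : Int) (out : String) : Decidable (Spec_sekunde_u_vrijeme a out) := by unfold Spec_sekunde_u_vrijeme; infer_instance

-- ===== CLAIM (what is proved, stated in full; the proofs are below) =====
def Claim_equal_sekunde_u_vrijeme : Prop := ∀ (a : Int), Dom_sekunde_u_vrijeme a → Spec_sekunde_u_vrijeme a (sekunde_u_vrijeme a)

-- ===== LEMMAS AND PROOFS =====

theorem sub_floordiv_mul (a b : Int) : a - PySem.Int.floordiv a b * b = PySem.Int.mod a b := by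
  have := PySem.Int.floordiv_mul_add_mod a b
  omega

theorem loop_exit (a : Int) (b0 b1 : String) (h : a < 60) :
    sekundeLoop a b0 b1 = PySem.Str.join ":" [b0, b1, PySem.Int.toStr a] := by
  rw [sekundeLoop]
  simp [not_le.mpr h]

theorem floordiv_eq_zero (a b : Int) (hb : 0 < b) (h0 : 0 ≤ a) (h1 : a < b) :
    PySem.Int.floordiv a b = 0 := by
  rw [PySem.Int.floordiv_eq_iff_of_pos hb]
  constructor <;> omega

theorem mod_small (a b : Int) (hb : 0 < b) (h0 : 0 ≤ a) (h1 : a < b) :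
    PySem.Int.mod a b = a := by
  have := PySem.Int.floordiv_mul_add_mod a b
  rw [floordiv_eq_zero a b hb h0 h1] at this
  omega

-- ===== VERDICT (by name: the statement is the Claim_ definition above) =====
theorem sekunde_u_vrijeme_spec : Claim_equal_sekunde_u_vrijeme := by
  intro a _
  unfold Spec_sekunde_u_vrijeme sekunde_u_vrijeme sekunde_u_vrijeme_alt
  by_cases h60 : a < 60
  · rw [loop_exit a "0" "0" h60, if_pos h60]
  · rw [not_lt] at h60
    rw [if_neg (not_lt.mpr h60)]
    by_cases h36 : 3600 ≤ a
    · -- first iteration takes the hour branch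
      rw [sekundeLoop, if_pos (by omega : (60:Int) ≤ a), if_pos h36, sub_floordiv_mul]
      have hr0 : 0 ≤ PySem.Int.mod a 3600 := PySem.Int.mod_nonneg a (by norm_num)
      have hr1 : PySem.Int.mod a 3600 < 3600 := PySem.Int.mod_lt a (by norm_num)
      set r := PySem.Int.mod a 3600 with hr
      by_cases hm : 60 ≤ r
      · rw [sekundeLoop, if_pos hm, if_neg (by omega), sub_floordiv_mul,
          loop_exit _ _ _ (by
            have := PySem.Int.mod_lt r (b := 60) (by norm_num); omega)]
      · rw [loop_exit _ _ _ (by omega)]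
        show _ = PySem.Str.join ":" [PySem.Int.toStr (PySem.Int.floordiv a 3600),
          PySem.Int.toStr (PySem.Int.floordiv r 60), PySem.Int.toStr (PySem.Int.mod r 60)]
        rw [floordiv_eq_zero r 60 (by norm_num) hr0 (by omega),
          mod_small r 60 (by norm_num) hr0 (by omega)]
        rfl
    · -- only the minute branch runs once
      rw [not_le] at h36
      rw [sekundeLoop, if_pos h60, if_neg (not_le.mpr h36), sub_floordiv_mul]
      have hs0 : 0 ≤ PySem.Int.mod a 60 := PySem.Int.mod_nonneg a (by norm_num)
      have hs1 : PySem.Int.mod a 60 < 60 := PySem.Int.mod_lt a (by norm_num)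
      rw [loop_exit _ _ _ hs1]
      show _ = PySem.Str.join ":" [PySem.Int.toStr (PySem.Int.floordiv a 3600),
        PySem.Int.toStr (PySem.Int.floordiv (PySem.Int.mod a 3600) 60),
        PySem.Int.toStr (PySem.Int.mod (PySem.Int.mod a 3600) 60)]
      rw [floordiv_eq_zero a 3600 (by norm_num) (by omega) h36,
        mod_small a 3600 (by norm_num) (by omega) h36]
      rfl
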